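-- pv_equiv track=rewrite | github.com/arunpandian9159/Agentic-Honey-Pot | app/agents/scammer_profiler.py | _dominant_manipulation_type
-- ===== SOURCE A (Python) =====
-- EMOTIONAL_MANIPULATION_MARKERS = {
--     "fear": [
--         "lose everything", "all your money", "account hacked",
--         "someone accessed", "unauthorized transaction", "stolen",
--         "danger", "risk", "at stake", "compromised",
--     ],
--     "urgency": [
--         "only today", "expires", "deadline", "limited time",
--         "last chance", "within 24 hours", "closing soon",
--         "running out", "window closing",
--     ],
--     "authority": [
--         "bank manager", "officer", "senior executive", "government",
--         "cyber cell", "fraud department", "investigation team",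
--         "reserve bank", "head office",
--     ],
--     "guilt": [
--         "help me", "i trusted you", "cooperate", "don't you care",
--         "your family", "think about", "for your safety",
--         "we're trying to help", "protect you",
--     ],
--     "greed": [
--         "guaranteed", "double your money", "100% return",
--         "risk free", "selected", "winner", "congratulations",
--         "lucky", "exclusive offer", "million", "lakh", "crore",
--     ],
-- }
--
-- def _dominant_manipulation_type(all_text: str) -> str:
--     """Identify the most used manipulation category."""
--     best_category = "none"
--     best_score = 0
--     for category, markers in EMOTIONAL_MANIPULATION_MARKERS.items():
--         hits = sum(1 for m in markers if m in all_text)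
--         if hits > best_score:
--             best_score = hits
--             best_category = category
--     return best_category
-- ===== SOURCE B (Python) =====
-- EMOTIONAL_MANIPULATION_MARKERS = {
--     "fear": [
--         "lose everything", "all your money", "account hacked",
--         "someone accessed", "unauthorized transaction", "stolen",
--         "danger", "risk", "at stake", "compromised",
--     ],
--     "urgency": [
--         "only today", "expires", "deadline", "limited time",
--         "last chance", "within 24 hours", "closing soon",
--         "running out", "window closing",
--     ],
--     "authority": [
--         "bank manager", "officer", "senior executive", "government",
--         "cyber cell", "fraud department", "investigation team",
--         "reserve bank", "head office",
--     ],
--     "guilt": [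
--         "help me", "i trusted you", "cooperate", "don't you care",
--         "your family", "think about", "for your safety",
--         "we're trying to help", "protect you",
--     ],
--     "greed": [
--         "guaranteed", "double your money", "100% return",
--         "risk free", "selected", "winner", "congratulations",
--         "lucky", "exclusive offer", "million", "lakh", "crore",
--     ],
-- }
--
--
-- def _dominant_manipulation_type(all_text: str) -> str:
--     """Identify the most used manipulation category."""
--     def best(items):
--         # recursion from the back: head beats the tail's champion on >=,
--         # so the first category of the original order wins ties
--         if not items:
--             return ("none", 0)
--         (cat, markers), rest = items[0], items[1:]
--         hits = len([m for m in markers if m in all_text])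
--         champ = best(rest)
--         return (cat, hits) if hits >= champ[1] else champ
--
--     cat, score = best(list(EMOTIONAL_MANIPULATION_MARKERS.items()))
--     return cat if score > 0 else "none"
-- ===== Notes on version B (the rewrite author's own statement) =====
-- stated objective: alternative
-- what changed: B computes the winner by structural recursion from the BACK of the category list (each category's filter-length hit count is compared with >= against the champion of the remaining categories, so ties resolve to the earlier category), instead of A's forward iterative loop with a running best_score and strict > comparison.
import Mathlib
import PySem

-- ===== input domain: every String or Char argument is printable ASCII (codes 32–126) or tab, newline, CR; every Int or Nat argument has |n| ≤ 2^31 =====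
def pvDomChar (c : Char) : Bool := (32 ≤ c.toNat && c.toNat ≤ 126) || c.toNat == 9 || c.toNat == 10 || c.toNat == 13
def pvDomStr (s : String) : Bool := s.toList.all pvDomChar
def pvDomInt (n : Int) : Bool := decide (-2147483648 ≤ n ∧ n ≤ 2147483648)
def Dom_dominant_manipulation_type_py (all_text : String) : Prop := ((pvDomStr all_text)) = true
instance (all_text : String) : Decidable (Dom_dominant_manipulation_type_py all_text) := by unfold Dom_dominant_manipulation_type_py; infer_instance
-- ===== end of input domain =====

-- B selects the dominant category by structural recursion from the BACK of the category
-- list (>= against the tail's champion keeps the earlier category on ties), replacing A's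
-- forward loop with running best state ('alternative' decomposition; same cost).

-- module constant EMOTIONAL_MANIPULATION_MARKERS (shared data, not code)
def MARKERS : List (String × List String) :=
  [("fear", ["lose everything", "all your money", "account hacked",
             "someone accessed", "unauthorized transaction", "stolen",
             "danger", "risk", "at stake", "compromised"]),
   ("urgency", ["only today", "expires", "deadline", "limited time",
                "last chance", "within 24 hours", "closing soon",
                "running out", "window closing"]),
   ("authority", ["bank manager", "officer", "senior executive", "government",
                  "cyber cell", "fraud department", "investigation team",
                  "reserve bank", "head office"]),
   ("guilt", ["help me", "i trusted you", "cooperate", "don't you care",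
              "your family", "think about", "for your safety",
              "we're trying to help", "protect you"]),
   ("greed", ["guaranteed", "double your money", "100% return",
              "risk free", "selected", "winner", "congratulations",
              "lucky", "exclusive offer", "million", "lakh", "crore"])]

-- ===== PORT A =====
-- hits = sum(1 for m in markers if m in all_text)
def hitsA (all_text : String) (ms : List String) : Int :=
  ms.foldl (fun acc m => if PySem.Str.isIn m all_text then acc + 1 else acc) 0

def dominant_manipulation_type_py (all_text : String) : String :=
  (MARKERS.foldl (fun (b : String × Int) cm =>
      let hits := hitsA all_text cm.2
      if hits > b.2 then (cm.1, hits) else b) ("none", 0)).1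

-- ===== PORT B =====
-- hits = len([m for m in markers if m in all_text])
def hitsB (all_text : String) (ms : List String) : Int :=
  Int.ofNat (ms.filter (fun m => PySem.Str.isIn m all_text)).length

-- recursive 'best' over the remaining (category, markers) items, back to front
def bestB (all_text : String) : List (String × List String) → String × Int
  | [] => ("none", 0)
  | (cat, markers) :: rest =>
    let hits := hitsB all_text markers
    let champ := bestB all_text rest
    if hits ≥ champ.2 then (cat, hits) else champ

def dominant_manipulation_type_py_alt (all_text : String) : String :=
  let r := bestB all_text MARKERS
  if r.2 > 0 then r.1 else "none"

-- ===== PRECONDITION & SPEC =====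
def Spec_dominant_manipulation_type_py (all_text : String) (out : String) : Prop := out = dominant_manipulation_type_py_alt all_text
instance (all_text : String) (out : String) : Decidable (Spec_dominant_manipulation_type_py all_text out) := by unfold Spec_dominant_manipulation_type_py; infer_instance

-- ===== CLAIM (what is proved, stated in full; the proofs are below) =====
def Claim_equal_dominant_manipulation_type_py : Prop := ∀ (all_text : String), Dom_dominant_manipulation_type_py all_text → Spec_dominant_manipulation_type_py all_text (dominant_manipulation_type_py all_text)

-- ===== LEMMAS AND PROOFS =====

-- A's forward step on (category, score) pairs
def pvStepA (b p : String × Int) : String × Int := if p.2 > b.2 then p else b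
-- B's backward step
def pvFB (l : List (String × Int)) : String × Int :=
  l.foldr (fun p b => if p.2 ≥ b.2 then p else b) ("none", 0)

lemma pvFB_nil : pvFB [] = ("none", 0) := rfl
lemma pvFB_cons (p : String × Int) (t : List (String × Int)) :
    pvFB (p :: t) = if p.2 ≥ (pvFB t).2 then p else pvFB t := rfl

-- key lemma: forward foldl with strict > from accumulator b equals
-- 'backward champion if it strictly beats b, else b'
lemma pvKey (l : List (String × Int)) (h : ∀ p ∈ l, 0 ≤ p.2) (b : String × Int)
    (hb : 0 ≤ b.2) :
    l.foldl pvStepA b = if b.2 < (pvFB l).2 then pvFB l else b := by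
  induction l generalizing b with
  | nil =>
    rw [List.foldl_nil, pvFB_nil, if_neg (by omega)]
  | cons p t ih =>
    have hp : 0 ≤ p.2 := h p (by simp)
    have ht : ∀ q ∈ t, 0 ≤ q.2 := fun q hq => h q (by simp [hq])
    rw [List.foldl_cons, pvFB_cons]
    by_cases hbp : b.2 < p.2
    · have hs : pvStepA b p = p := if_pos hbp
      rw [hs, ih ht p hp]
      by_cases hpt : p.2 ≥ (pvFB t).2
      · rw [if_pos hpt, if_neg (by omega), if_pos hbp]
      · rw [if_neg hpt, if_pos (by omega), if_pos (by omega)]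
    · have hs : pvStepA b p = b := if_neg hbp
      rw [hs, ih ht b hb]
      by_cases hpt : p.2 ≥ (pvFB t).2
      · rw [if_pos hpt, if_neg (by omega), if_neg (by omega)]
      · rw [if_neg hpt]

-- hits agree: counting fold = filter length
lemma hits_eq (s : String) (ms : List String) : hitsA s ms = hitsB s ms := by
  unfold hitsA hitsB
  have : ∀ (a : Int), ms.foldl (fun acc m => if PySem.Str.isIn m s then acc + 1 else acc) a
      = a + Int.ofNat (ms.filter (fun m => PySem.Str.isIn m s)).length := by
    induction ms with
    | nil => intro a; simp
    | cons m t ih =>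
      intro a
      rw [List.foldl_cons, List.filter_cons]
      by_cases hm : PySem.Str.isIn m s = true
      · rw [if_pos hm, ih (a + 1), if_pos hm]
        simp only [List.length_cons, Int.ofNat_eq_natCast]
        push_cast
        ring
      · simp only [hm, Bool.false_eq_true, if_false, ih a]
  rw [this 0]; omega

def pvG (s : String) (cm : String × List String) : String × Int := (cm.1, hitsB s cm.2)

lemma a_eq (s : String) :
    dominant_manipulation_type_py s = ((MARKERS.map (pvG s)).foldl pvStepA ("none", 0)).1 := by
  unfold dominant_manipulation_type_py
  rw [List.foldl_map]
  congr 1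
  apply List.foldl_ext
  intro b cm _
  simp only [pvStepA, pvG, hits_eq]

lemma bestB_eq (s : String) (l : List (String × List String)) :
    bestB s l = pvFB (l.map (pvG s)) := by
  induction l with
  | nil => rfl
  | cons cm t ih =>
    obtain ⟨c, ms⟩ := cm
    rw [List.map_cons, pvFB_cons, ← ih]
    rfl

lemma pvG_nonneg (s : String) (l : List (String × List String)) :
    ∀ p ∈ l.map (pvG s), 0 ≤ p.2 := by
  intro p hp
  obtain ⟨cm, _, rfl⟩ := List.mem_map.1 hp
  simp [pvG, hitsB]

-- ===== VERDICT (by name: the statement is the Claim_ definition above) =====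
theorem dominant_manipulation_type_py_spec : Claim_equal_dominant_manipulation_type_py := by
  intro s _
  show dominant_manipulation_type_py s = dominant_manipulation_type_py_alt s
  unfold dominant_manipulation_type_py_alt
  rw [a_eq, bestB_eq]
  rw [pvKey _ (pvG_nonneg s MARKERS) _ (by norm_num)]
  set F := pvFB (MARKERS.map (pvG s)) with hF
  by_cases hpos : (0 : Int) < F.2
  · rw [if_pos hpos, if_pos hpos]
  · rw [if_neg hpos, if_neg hpos]
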